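-- pv_equiv track=rewrite | github.com/Ziang-Liu/neko-chan-telegram-bot | src/telegraphlib/download.py | _get_pic_url
-- ===== SOURCE A (Python) =====
-- def _get_pic_url(text) -> list:
--     urls = []
--     start = 0
--     while True:
--         start = text.find('img src="', start)
--         if start == -1:
--             break
--         start += 9
--         end = text.find('"', start)
--         if end == -1:
--             break
--         urls.append(text[start:end])
--         start = end
--
--     return urls
-- ===== SOURCE B (Python) =====
-- import re
--
-- _IMG_RE = re.compile(r'img src="([^"]*)"')
--
-- def _get_pic_url(text) -> list:
--     return _IMG_RE.findall(text)
-- ===== Notes on version B (the rewrite author's own statement) =====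
-- stated objective: idiomatic
-- what changed: Replaces the manual find/advance while-loop with a single compiled-regex findall pass (a left-to-right match-and-consume scan capturing everything between the img-src marker and the next quote, instead of index bookkeeping with find and slicing).
import Mathlib
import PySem

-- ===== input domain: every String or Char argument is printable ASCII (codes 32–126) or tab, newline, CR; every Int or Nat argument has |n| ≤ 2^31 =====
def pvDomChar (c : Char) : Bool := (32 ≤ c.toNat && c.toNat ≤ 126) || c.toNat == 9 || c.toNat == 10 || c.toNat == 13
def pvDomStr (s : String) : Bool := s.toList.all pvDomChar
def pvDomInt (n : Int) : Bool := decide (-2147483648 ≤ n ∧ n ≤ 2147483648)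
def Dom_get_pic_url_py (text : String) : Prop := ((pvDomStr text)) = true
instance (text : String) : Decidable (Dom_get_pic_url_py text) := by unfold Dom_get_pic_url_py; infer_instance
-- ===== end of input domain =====

-- B replaces A's manual find/advance while-loop by a regex-findall style left-to-right
-- match-and-consume scan (same results, ported as a position scan); objective: idiomatic.

-- the literal 'img src="' (9 characters)
def pvLit : List Char := "img src=\"".toList

-- ===== PORT A =====
-- A's while-loop: find 'img src="' from start, find the closing '"', slice, continue at the quote.
-- The `hk` proof argument only records that the running index stays in range (needed for termination).
def goA (cs : List Char) (start : Nat) (hk : start ≤ cs.length) (acc : List String) : List String :=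
  if hf : PySem.Chars.findFrom cs pvLit (start : Int) none = -1 then acc
  else
    have spec1 := PySem.Chars.findFrom_natCast_spec cs pvLit start hk hf
    have h9 : (PySem.Chars.findFrom cs pvLit (start : Int) none).toNat + 9 ≤ cs.length := by
      have hpre := spec1.2.1
      have hl := hpre.length_le
      rw [List.length_drop] at hl
      have h9' : pvLit.length = 9 := by decide
      omega
    if he : PySem.Chars.findFrom cs ['"']
        (((PySem.Chars.findFrom cs pvLit (start : Int) none).toNat + 9 : Nat) : Int) none = -1 then acc
    else
      have spec2 := PySem.Chars.findFrom_natCast_spec cs ['"']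
        ((PySem.Chars.findFrom cs pvLit (start : Int) none).toNat + 9) h9 he
      have hqlen : (PySem.Chars.findFrom cs ['"']
          (((PySem.Chars.findFrom cs pvLit (start : Int) none).toNat + 9 : Nat) : Int) none).toNat ≤ cs.length := by
        have hpre := spec2.2.1
        have hl := hpre.length_le
        rw [List.length_drop] at hl
        have h1 : (['"'] : List Char).length = 1 := rfl
        omega
      goA cs (PySem.Chars.findFrom cs ['"']
          (((PySem.Chars.findFrom cs pvLit (start : Int) none).toNat + 9 : Nat) : Int) none).toNat hqlen
        (acc ++ [String.ofList (PySem.List.slice cs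
          (some (((PySem.Chars.findFrom cs pvLit (start : Int) none).toNat + 9 : Nat) : Int))
          (some (PySem.Chars.findFrom cs ['"']
            (((PySem.Chars.findFrom cs pvLit (start : Int) none).toNat + 9 : Nat) : Int) none)))])
termination_by cs.length - start
decreasing_by
  have h1 := spec1.1
  have h2 := spec2.1
  omega

def get_pic_url_py (text : String) : List String :=
  goA text.toList 0 (Nat.zero_le _) []

-- ===== PORT B =====
-- Source B: re.findall(r'img src="([^"]*)"', text).  Ported as the regex engine's scan: at each
-- position try to match the literal, then capture up to the next '"'; on success consume the
-- whole match, on failure advance one position.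

-- split a list at its first '"' : some (before, after-the-quote), none if there is no '"'
def splitAtQuote : List Char → Option (List Char × List Char)
  | [] => none
  | c :: rest =>
    if c = '"' then some ([], rest)
    else
      match splitAtQuote rest with
      | none => none
      | some (u, r) => some (c :: u, r)

theorem splitAtQuote_len : ∀ {l u r : List Char}, splitAtQuote l = some (u, r) →
    u.length + r.length + 1 = l.length := by
  intro l
  induction l with
  | nil => intro u r h; simp [splitAtQuote] at h
  | cons c rest ih =>
    intro u r h
    by_cases hc : c = '"'
    · simp [splitAtQuote, hc] at h
      obtain ⟨hu, hr⟩ := h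
      subst hu; subst hr; simp
    · simp [splitAtQuote, hc] at h
      cases hm : splitAtQuote rest with
      | none => rw [hm] at h; simp at h
      | some p =>
        rw [hm] at h
        cases p with
        | mk u' r' =>
          simp at h
          obtain ⟨hu, hr⟩ := h
          have := ih hm
          subst hu; subst hr
          simp; omega

def goB : List Char → List String
  | [] => []
  | c :: rest =>
    if pvLit.isPrefixOf (c :: rest) then
      match h : splitAtQuote ((c :: rest).drop 9) with
      | some (u, r) => String.ofList u :: goB r
      | none => goB rest
    else goB rest
termination_by l => l.length
decreasing_by
  · have := splitAtQuote_len h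
    simp at this ⊢
    omega
  · simp
  · simp

def get_pic_url_py_alt (text : String) : List String :=
  goB text.toList

-- ===== PRECONDITION & SPEC =====
def Spec_get_pic_url_py (text : String) (out : List String) : Prop := out = get_pic_url_py_alt text
instance (text : String) (out : List String) : Decidable (Spec_get_pic_url_py text out) := by unfold Spec_get_pic_url_py; infer_instance

-- ===== CLAIM (what is proved, stated in full; the proofs are below) =====
def Claim_equal_get_pic_url_py : Prop := ∀ (text : String), Dom_get_pic_url_py text → Spec_get_pic_url_py text (get_pic_url_py text)

-- ===== LEMMAS AND PROOFS =====

theorem pvLit_eq : pvLit = ['i', 'm', 'g', ' ', 's', 'r', 'c', '=', '"'] := by decide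

theorem goB_cons_of_not_prefix {c : Char} {rest : List Char}
    (h : ¬ pvLit <+: (c :: rest)) : goB (c :: rest) = goB rest := by
  rw [goB]
  rw [if_neg (by simpa [List.isPrefixOf_iff_prefix] using h)]

theorem splitAtQuote_none_of_not_mem : ∀ {l : List Char}, '"' ∉ l → splitAtQuote l = none := by
  intro l h
  induction l with
  | nil => rfl
  | cons c rest ih =>
    have hc : ¬ c = '"' := by intro hc; exact h (by simp [hc])
    have hr : '"' ∉ rest := fun hm => h (by simp [hm])
    simp [splitAtQuote, hc, ih hr]

theorem splitAtQuote_first : ∀ (l : List Char) (q : Nat),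
    ['"'] <+: l.drop q → (∀ i, i < q → ¬ ['"'] <+: l.drop i) →
    splitAtQuote l = some (l.take q, l.drop (q + 1)) := by
  intro l
  induction l with
  | nil =>
    intro q hq _
    rw [List.drop_nil] at hq
    exact absurd (List.prefix_nil.mp hq) (by simp)
  | cons c rest ih =>
    intro q hq hmin
    cases q with
    | zero =>
      rw [List.drop_zero] at hq
      obtain ⟨t, ht⟩ := hq
      cases ht
      simp [splitAtQuote]
    | succ q' =>
      have hc : ¬ c = '"' := by
        intro hc
        exact hmin 0 (Nat.succ_pos _) (by simp [hc])
      have hq' : ['"'] <+: rest.drop q' := by simpa using hq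
      have hmin' : ∀ i, i < q' → ¬ ['"'] <+: rest.drop i := by
        intro i hi hpre
        exact hmin (i + 1) (by omega) (by simpa using hpre)
      simp [splitAtQuote, hc, ih q' hq' hmin']

theorem mem_iff_singleton_infix {c : Char} {l : List Char} : c ∈ l ↔ [c] <:+: l := by
  constructor
  · intro hm
    obtain ⟨s, t, hst⟩ := List.append_of_mem hm
    exact ⟨s, t, by simp [hst]⟩
  · intro h
    exact h.sublist.subset (by simp)

theorem goB_nil : goB [] = [] := by rw [goB]

theorem goB_eq_nil_of_no_quote : ∀ (l : List Char), '"' ∉ l.drop 9 → goB l = [] := by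
  intro l
  induction l with
  | nil => intro _; rw [goB]
  | cons c rest ih =>
    intro h
    have hdrop : (c :: rest).drop 9 = rest.drop 8 := by simp
    have h8 : '"' ∉ rest.drop 8 := by rw [hdrop] at h; exact h
    have h9 : '"' ∉ rest.drop 9 := by
      intro hm
      apply h8
      have he : rest.drop 9 = (rest.drop 8).drop 1 := by rw [List.drop_drop]
      exact List.mem_of_mem_drop (he ▸ hm)
    have hnone : splitAtQuote (rest.drop 8) = none := by
      rw [← hdrop]; exact splitAtQuote_none_of_not_mem h
    rw [goB]
    by_cases hp : pvLit.isPrefixOf (c :: rest)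
    · rw [if_pos hp]
      split
      · next u r heq =>
        rw [show List.drop 9 (c :: rest) = rest.drop 8 from rfl, hnone] at heq
        cases heq
      · exact ih h9
    · rw [if_neg hp]; exact ih h9

theorem goB_nil_of_not_infix : ∀ (l : List Char), ¬ pvLit <:+: l → goB l = [] := by
  intro l
  induction l with
  | nil => intro _; rw [goB]
  | cons c rest ih =>
    intro h
    have hp : ¬ pvLit <+: (c :: rest) := fun hp => h hp.isInfix
    have hr : ¬ pvLit <:+: rest := fun hr => h (hr.trans (List.suffix_cons c rest).isInfix)
    rw [goB_cons_of_not_prefix hp]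
    exact ih hr

theorem goB_drop_of_no_match : ∀ (k : Nat) (cs : List Char) (a b : Nat), b - a ≤ k → a ≤ b →
    b ≤ cs.length → (∀ i, a ≤ i → i < b → ¬ pvLit <+: cs.drop i) →
    goB (cs.drop a) = goB (cs.drop b) := by
  intro k
  induction k with
  | zero =>
    intro cs a b h1 h2 _ _
    have : a = b := by omega
    rw [this]
  | succ k ih =>
    intro cs a b h1 h2 hb h
    by_cases hab : a = b
    · rw [hab]
    · have ha : a < b := by omega
      have halen : a < cs.length := by omega
      have hcons : cs.drop a = cs[a] :: cs.drop (a + 1) := List.drop_eq_getElem_cons halen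
      rw [hcons, goB_cons_of_not_prefix (by rw [← hcons]; exact h a le_rfl ha)]
      exact ih cs (a + 1) b (by omega) (by omega) hb (fun i hi1 hi2 => h i (by omega) hi2)

theorem goB_match_step (t : List Char) :
    goB (pvLit ++ t) =
      (match splitAtQuote t with
       | some (u, r) => String.ofList u :: goB r
       | none => goB (pvLit.tail ++ t)) := by
  have hcons : pvLit ++ t = 'i' :: 'm' :: 'g' :: ' ' :: 's' :: 'r' :: 'c' :: '=' :: '"' :: t := by
    simp [pvLit_eq]
  have htail : pvLit.tail ++ t = 'm' :: 'g' :: ' ' :: 's' :: 'r' :: 'c' :: '=' :: '"' :: t := by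
    simp [pvLit_eq]
  rw [hcons, goB]
  rw [if_pos (by
    rw [List.isPrefixOf_iff_prefix, pvLit_eq]
    exact ⟨t, by simp⟩)]
  rw [htail]
  split
  · next u r heq =>
    rw [show List.drop 9 ('i' :: 'm' :: 'g' :: ' ' :: 's' :: 'r' :: 'c' :: '=' :: '"' :: t) = t
      from rfl] at heq
    rw [heq]
  · next heq =>
    rw [show List.drop 9 ('i' :: 'm' :: 'g' :: ' ' :: 's' :: 'r' :: 'c' :: '=' :: '"' :: t) = t
      from rfl] at heq
    rw [heq]

theorem goA_eq (cs : List Char) : ∀ (n start : Nat) (hk : start ≤ cs.length),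
    cs.length - start ≤ n → ∀ acc, goA cs start hk acc = acc ++ goB (cs.drop start) := by
  intro n
  induction n with
  | zero =>
    intro start hk hn acc
    have hs : start = cs.length := by omega
    have hdrop : cs.drop start = [] := by simp [hs]
    have hf : PySem.Chars.findFrom cs pvLit (start : Int) none = -1 := by
      rw [PySem.Chars.findFrom_natCast_eq_neg_one_iff cs pvLit start hk]
      rw [hdrop]
      simp [pvLit_eq]
    rw [goA, dif_pos hf, hdrop, goB_nil]
    simp
  | succ n ih =>
    intro start hk hn acc
    by_cases hf : PySem.Chars.findFrom cs pvLit (start : Int) none = -1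
    · rw [goA, dif_pos hf]
      have hni : ¬ pvLit <:+: cs.drop start :=
        (PySem.Chars.findFrom_natCast_eq_neg_one_iff cs pvLit start hk).mp hf
      rw [goB_nil_of_not_infix _ hni]
      simp
    · have spec1 := PySem.Chars.findFrom_natCast_spec cs pvLit start hk hf
      set f : Int := PySem.Chars.findFrom cs pvLit (start : Int) none with hfdef
      set p : Nat := f.toNat with hpdef
      have hsp : (start : Int) ≤ f := spec1.1
      have hstp : start ≤ p := by omega
      have hpre1 : pvLit <+: cs.drop p := spec1.2.1
      have hmin1 := spec1.2.2
      have hlen9 : p + 9 ≤ cs.length := by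
        have := hpre1.length_le
        rw [List.length_drop] at this
        have h9 : pvLit.length = 9 := by decide
        omega
      obtain ⟨t, ht⟩ := hpre1
      have htt : t = cs.drop (p + 9) := by
        have : cs.drop (p + 9) = (cs.drop p).drop 9 := by rw [List.drop_drop]
        rw [this, ← ht]
        simp [pvLit_eq]
      have hskip : goB (cs.drop start) = goB (cs.drop p) :=
        goB_drop_of_no_match (p - start) cs start p (by omega) hstp (by omega) hmin1
      by_cases he : PySem.Chars.findFrom cs ['"'] ((p + 9 : Nat) : Int) none = -1
      · rw [goA, dif_neg hf, dif_pos he]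
        have hnq : ¬ ['"'] <:+: cs.drop (p + 9) :=
          (PySem.Chars.findFrom_natCast_eq_neg_one_iff cs ['"'] (p + 9) hlen9).mp he
        have hmem : '"' ∉ cs.drop (p + 9) := fun hm => hnq (mem_iff_singleton_infix.mp hm)
        have hnone : splitAtQuote t = none :=
          splitAtQuote_none_of_not_mem (htt ▸ hmem)
        rw [hskip, ← ht, goB_match_step, hnone]
        have hno10 : '"' ∉ (pvLit.tail ++ t).drop 9 := by
          intro hm
          apply hmem
          rw [← htt]
          have heq : (pvLit.tail ++ t).drop 9 = t.drop 1 := by rw [pvLit_eq]; rfl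
          rw [heq] at hm
          exact List.mem_of_mem_drop hm
        rw [goB_eq_nil_of_no_quote _ hno10]
        simp
      · rw [goA, dif_neg hf, dif_neg he]
        have spec2 := PySem.Chars.findFrom_natCast_spec cs ['"'] (p + 9) hlen9 he
        set e : Int := PySem.Chars.findFrom cs ['"'] ((p + 9 : Nat) : Int) none with hedef
        set q : Nat := e.toNat with hqdef
        have hpe : ((p + 9 : Nat) : Int) ≤ e := spec2.1
        have hp9q : p + 9 ≤ q := by omega
        have hpre2 : ['"'] <+: cs.drop q := spec2.2.1
        have hmin2 := spec2.2.2
        have hqlen : q < cs.length := by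
          have := hpre2.length_le
          rw [List.length_drop] at this
          simp at this
          omega
        have hrec := ih q (by omega) (by omega)
          (acc ++ [String.ofList (PySem.List.slice cs (some ((p + 9 : Nat) : Int)) (some e))])
        rw [hrec]
        -- identify the slice with take
        have hslice : PySem.List.slice cs (some ((p + 9 : Nat) : Int)) (some e)
            = t.take (q - (p + 9)) := by
          rw [PySem.List.slice_toNat cs (by positivity) (by omega)]
          have h1 : ((p + 9 : Nat) : Int).toNat = p + 9 := by omega
          rw [h1, ← hqdef, ← htt]
        -- goB at p: match fires, first quote of t is at q - (p+9)
        have hq' : ['"'] <+: t.drop (q - (p + 9)) := by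
          rw [htt, List.drop_drop]
          have h2 : p + 9 + (q - (p + 9)) = q := by omega
          rw [h2]
          exact hpre2
        have hmin' : ∀ i, i < q - (p + 9) → ¬ ['"'] <+: t.drop i := by
          intro i hi
          rw [htt, List.drop_drop]
          exact hmin2 ((p + 9) + i) (by omega) (by omega)
        have hsome : splitAtQuote t = some (t.take (q - (p + 9)), t.drop (q - (p + 9) + 1)) :=
          splitAtQuote_first t (q - (p + 9)) hq' hmin'
        have hdropq1 : t.drop (q - (p + 9) + 1) = cs.drop (q + 1) := by
          rw [htt, List.drop_drop]
          congr 1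
          omega
        -- goB (cs.drop q) skips the quote character
        obtain ⟨t2, ht2⟩ := hpre2
        have ht2' : t2 = cs.drop (q + 1) := by
          have : cs.drop (q + 1) = (cs.drop q).drop 1 := by rw [List.drop_drop]
          rw [this, ← ht2]
          simp
        have hquoteskip : goB (cs.drop q) = goB (cs.drop (q + 1)) := by
          rw [← ht2, List.singleton_append]
          rw [goB_cons_of_not_prefix (by
            rw [pvLit_eq]
            intro hpre
            have := (List.cons_prefix_cons.mp hpre).1
            simp at this)]
          rw [ht2']
        rw [hskip, ← ht, goB_match_step, hsome, hquoteskip, ← hdropq1, hslice]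
        simp
  
-- ===== VERDICT (by name: the statement is the Claim_ definition above) =====
theorem get_pic_url_py_spec : Claim_equal_get_pic_url_py := by
  intro text _
  unfold Spec_get_pic_url_py get_pic_url_py get_pic_url_py_alt
  simpa using goA_eq text.toList text.toList.length 0 (Nat.zero_le _) (by omega) []
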